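-- pv_equiv track=rewrite | github.com/pypi-data/pypi-mirror-403 | packages/iflow-mcp_54rt1n_container-mcp/iflow_mcp_54rt1n_container_mcp-0.0.1-py3-none-any.whl/cmcp/utils/diff.py | split_patch_into_files
-- ===== SOURCE A (Python) =====
-- from typing import List, Dict, Any, Optional, Tuple, NamedTuple
--
-- def split_patch_into_files(patch_content: str) -> Dict[str, str]:
--     """Split a patch file into individual file diffs.
--
--     Args:
--         patch_content: Content of the patch file
--
--     Returns:
--         Dictionary mapping file paths to their diff content
--     """
--     file_diffs = {}
--     lines = patch_content.splitlines()
--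
--     current_file = None
--     current_diff_lines = []
--
--     for line in lines:
--         if line.startswith('--- '):
--             # Start of a new file diff
--             if current_file and current_diff_lines:
--                 file_diffs[current_file] = "\n".join(current_diff_lines)
--
--             # Extract filename (remove a/ prefix if present)
--             filename = line[4:].strip()
--             if filename.startswith('a/'):
--                 filename = filename[2:]
--             current_file = filename
--             current_diff_lines = [line]
--         elif current_file:
--             current_diff_lines.append(line)
--
--     # Add the last file
--     if current_file and current_diff_lines:
--         file_diffs[current_file] = "\n".join(current_diff_lines)
--
--     return file_diffs
-- ===== SOURCE B (Python) =====
-- def split_patch_into_files(patch_content: str):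
--     """Split a patch into per-file diffs: group lines into segments back-to-front,
--     then build the dict from the segments."""
--     segments = []
--     tail = []
--     for line in reversed(patch_content.splitlines()):
--         if line.startswith('--- '):
--             segments.insert(0, [line] + tail)
--             tail = []
--         else:
--             tail.insert(0, line)
--     file_diffs = {}
--     for seg in segments:
--         filename = seg[0][4:].strip()
--         if filename.startswith('a/'):
--             filename = filename[2:]
--         if filename:
--             file_diffs[filename] = "\n".join(seg)
--     return file_diffs
-- ===== Notes on version B (the rewrite author's own statement) =====
-- stated objective: alternative
-- what changed: Replaces A's forward state machine (current_file/current_diff_lines with flush-at-boundary and flush-at-end) by a two-phase decomposition: a backward pass that groups lines into boundary-led segments, then a pass that extracts each segment's filename and builds the dict.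
import Mathlib
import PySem

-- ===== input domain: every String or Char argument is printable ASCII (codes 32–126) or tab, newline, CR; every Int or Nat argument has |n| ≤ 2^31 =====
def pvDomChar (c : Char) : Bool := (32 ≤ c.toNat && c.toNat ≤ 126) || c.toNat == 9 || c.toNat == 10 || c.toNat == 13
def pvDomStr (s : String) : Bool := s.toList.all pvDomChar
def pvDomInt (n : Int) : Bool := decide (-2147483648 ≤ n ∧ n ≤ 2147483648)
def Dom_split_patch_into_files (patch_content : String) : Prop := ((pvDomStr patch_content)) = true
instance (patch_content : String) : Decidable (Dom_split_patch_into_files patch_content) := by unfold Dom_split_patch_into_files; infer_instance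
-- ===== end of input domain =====

-- B replaces A's forward current_file/current_diff_lines state machine (flush at each
-- boundary and at the end) by a two-phase decomposition: group lines into boundary-led
-- segments back-to-front, then build the dict from the segments (objective: alternative).

-- ===== PORT A =====
-- filename extraction shared by both Pythons verbatim: line[4:].strip(), drop a leading 'a/'
def pvName (line : String) : String :=
  let filename := PySem.Str.strip (PySem.Str.slice line (some 4) none)
  if PySem.Str.startswith filename "a/" then PySem.Str.slice filename (some 2) none
  else filename

-- Python truthiness of current_file (None or '' is falsy)
def pvTruthy (cur : Option String) : Bool :=
  match cur with
  | some f => f != ""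
  | none => false

-- 'if current_file and current_diff_lines: file_diffs[current_file] = "\n".join(current_diff_lines)'
def pvFlush (d : PySem.Dict String String) (cur : Option String) (acc : List String) :
    PySem.Dict String String :=
  match cur with
  | some f => if f ≠ "" ∧ acc ≠ [] then d.insert f (PySem.Str.join "\n" acc) else d
  | none => d

-- one iteration of A's loop over (file_diffs, current_file, current_diff_lines)
def pvStepA (st : PySem.Dict String String × Option String × List String) (line : String) :
    PySem.Dict String String × Option String × List String :=
  let (file_diffs, current_file, current_diff_lines) := st
  if PySem.Str.startswith line "--- " then
    (pvFlush file_diffs current_file current_diff_lines, some (pvName line), [line])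
  else if pvTruthy current_file then
    (file_diffs, current_file, current_diff_lines ++ [line])
  else st

-- the final 'add the last file' flush plus returning the dict
def pvFinishA (st : PySem.Dict String String × Option String × List String) :
    List (String × String) :=
  (pvFlush st.1 st.2.1 st.2.2).items

def split_patch_into_files (patch_content : String) : List (String × String) :=
  pvFinishA ((PySem.Str.splitlines patch_content).foldl pvStepA (PySem.Dict.empty, none, []))

-- ===== PORT B =====
-- one iteration of B's backward grouping loop over (segments, tail)
def pvStepB (st : List (List String) × List String) (line : String) :
    List (List String) × List String :=
  let (segments, tail) := st
  if PySem.Str.startswith line "--- " then ((line :: tail) :: segments, [])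
  else (segments, line :: tail)

-- one iteration of B's second loop: insert a segment into the dict
def pvInsertSeg (d : PySem.Dict String String) (seg : List String) : PySem.Dict String String :=
  match seg with
  | [] => d
  | first :: _ =>
    let filename := pvName first
    if filename ≠ "" then d.insert filename (PySem.Str.join "\n" seg) else d

def split_patch_into_files_alt (patch_content : String) : List (String × String) :=
  ((((PySem.Str.splitlines patch_content).reverse).foldl pvStepB ([], [])).1.foldl
    pvInsertSeg PySem.Dict.empty).items

-- ===== PRECONDITION & SPEC =====
def Spec_split_patch_into_files (patch_content : String) (out : List (String × String)) : Prop := out = split_patch_into_files_alt patch_content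
instance (patch_content : String) (out : List (String × String)) : Decidable (Spec_split_patch_into_files patch_content out) := by unfold Spec_split_patch_into_files; infer_instance

-- ===== CLAIM (what is proved, stated in full; the proofs are below) =====
def Claim_equal_split_patch_into_files : Prop := ∀ (patch_content : String), Dom_split_patch_into_files patch_content → Spec_split_patch_into_files patch_content (split_patch_into_files patch_content)

-- ===== LEMMAS AND PROOFS =====

-- B's backward grouping, in foldr form (= foldl over the reversed list, List.foldl_reverse)
def pvSegs (lines : List String) : List (List String) × List String :=
  lines.foldr (fun line st => pvStepB st line) ([], [])

lemma pvSegs_cons (l : String) (ls : List String) :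
    pvSegs (l :: ls) = pvStepB (pvSegs ls) l := rfl

-- flushing a freshly started segment equals B's segment insertion
lemma pvFlush_name (d : PySem.Dict String String) (l : String) (tl : List String) :
    pvFlush d (some (pvName l)) ([l] ++ (if pvTruthy (some (pvName l)) then tl else [])) =
      pvInsertSeg d (l :: tl) := by
  by_cases h : pvName l = ""
  · simp [pvFlush, pvTruthy, pvInsertSeg, h]
  · simp [pvFlush, pvTruthy, pvInsertSeg, h]

-- main invariant: A's loop + final flush from any state = B's segment build, with the
-- pending lines (B's tail) appended to A's accumulator when the current file is live
lemma pvKey (lines : List String) : ∀ (d : PySem.Dict String String) (cur : Option String)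
    (acc : List String),
    pvFinishA (lines.foldl pvStepA (d, cur, acc)) =
      ((pvSegs lines).1.foldl pvInsertSeg
        (pvFlush d cur (acc ++ (if pvTruthy cur then (pvSegs lines).2 else [])))).items := by
  induction lines with
  | nil =>
    intro d cur acc
    cases pvTruthy cur <;> simp [pvSegs, pvFinishA]
  | cons l ls ih =>
    intro d cur acc
    rw [pvSegs_cons]
    by_cases hb : PySem.Str.startswith l "--- "
    · simp only [List.foldl_cons, pvStepA, pvStepB, hb, if_true]
      rw [ih]
      simp only [pvFlush_name]
      cases pvTruthy cur <;> simp
    · by_cases ht : pvTruthy cur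
      · simp only [List.foldl_cons, pvStepA, pvStepB, hb, if_false, Bool.false_eq_true, ht,
          if_true]
        rw [ih]
        simp [ht]
      · simp only [List.foldl_cons, pvStepA, pvStepB, hb, if_false, Bool.false_eq_true, ht]
        rw [ih]
        simp [ht]

-- ===== VERDICT (by name: the statement is the Claim_ definition above) =====
theorem split_patch_into_files_spec : Claim_equal_split_patch_into_files := by
  intro patch_content _
  unfold Spec_split_patch_into_files split_patch_into_files split_patch_into_files_alt
  rw [List.foldl_reverse]
  have h := pvKey (PySem.Str.splitlines patch_content) PySem.Dict.empty none []
  simp only [pvSegs, pvFlush] at h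
  rw [h]
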